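-- pv_equiv track=rewrite | github.com/yj95228/practice-coding-test | python/SWEA/[13798] 괄호검사.py | solution
-- ===== SOURCE A (Python) =====
-- def solution(txt):
--     quote = False
--     bracket = []
--     for t in txt:
--         if quote:
--             if t in ["\'", '\"']:
--                 quote = False
--         else:
--             if t in ["\'", '\"']:
--                 quote = True
--             elif t in ['(', '{']:
--                 bracket.append(t)
--             elif t in [')', '}']:
--                 if bracket:
--                     if (bracket[-1] == '(' and t == ')')\
--                     or (bracket[-1] == '{' and t == '}'):
--                         bracket.pop()
--                     else:
--                         return 0
--                 else:
--                     return 0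
--     return 0 if bracket else 1
-- ===== SOURCE B (Python) =====
-- def solution(txt):
--     # Recursive-descent parser for the grammar  seq := ('(' seq ')' | '{' seq '}' | quoted-span | other-char)* ;
--     # the text is valid iff one seq covers it entirely.
--     n = len(txt)
--
--     def parse(i):
--         # Parse one seq starting at index i; return the index where it stops
--         # (end of text or an unconsumed closer), or -1 on a mismatched closer.
--         while i < n:
--             c = txt[i]
--             if c in "'\"":
--                 j = i + 1
--                 while j < n and txt[j] not in "'\"":
--                     j += 1
--                 i = j + 1  # skip the quoted span (to end of text if unterminated)
--             elif c in "({":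
--                 j = parse(i + 1)
--                 if j < 0 or j >= n or txt[j] != (")" if c == "(" else "}"):
--                     return -1
--                 i = j + 1
--             elif c in ")}":
--                 return i
--             else:
--                 i += 1
--         return n
--
--     return 1 if parse(0) == n else 0
-- ===== Notes on version B (the rewrite author's own statement) =====
-- stated objective: alternative
-- what changed: Replaced A's iterative quote-flag + explicit stack automaton by a recursive-descent parser for the bracket grammar: one recursive parse function that consumes quoted spans by scanning to the next quote and matches each opener by recursing on its body, with no stack and no flag.
import Mathlib
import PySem

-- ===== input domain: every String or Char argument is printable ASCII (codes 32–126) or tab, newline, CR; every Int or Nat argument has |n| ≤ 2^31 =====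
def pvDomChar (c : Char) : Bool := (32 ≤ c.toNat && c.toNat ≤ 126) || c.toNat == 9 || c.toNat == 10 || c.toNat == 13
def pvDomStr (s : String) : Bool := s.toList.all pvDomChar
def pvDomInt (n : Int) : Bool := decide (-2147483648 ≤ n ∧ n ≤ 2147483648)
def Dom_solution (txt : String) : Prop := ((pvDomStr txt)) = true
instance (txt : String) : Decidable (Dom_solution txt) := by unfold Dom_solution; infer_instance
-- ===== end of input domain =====

-- B replaces A's quote-flag + stack automaton by a recursive-descent parser for the bracket grammar; alternative decomposition, same cost.

-- ===== PORT A =====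
-- A's single loop: quote flag + bracket stack (stack top at head, mirroring append/[-1]/pop).
def solutionLoop (quote : Bool) (bracket : List Char) : List Char → Int
  | [] => if bracket.isEmpty then 1 else 0
  | t :: rest =>
    if quote then
      if t = '\'' ∨ t = '"' then solutionLoop false bracket rest
      else solutionLoop true bracket rest
    else
      if t = '\'' ∨ t = '"' then solutionLoop true bracket rest
      else if t = '(' ∨ t = '{' then solutionLoop quote (t :: bracket) rest
      else if t = ')' ∨ t = '}' then
        match bracket with
        | [] => 0
        | top :: s =>
          if (top = '(' ∧ t = ')') ∨ (top = '{' ∧ t = '}') then solutionLoop quote s rest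
          else 0
      else solutionLoop quote bracket rest

def solution (txt : String) : Int := solutionLoop false [] txt.toList

-- ===== PORT B =====
-- Source B's inner quote scan: drop characters up to and including the next quote char.
def skipQuote : List Char → List Char
  | [] => []
  | c :: rest => if c = '\'' ∨ c = '"' then rest else skipQuote rest

theorem skipQuote_length (cs : List Char) : (skipQuote cs).length ≤ cs.length := by
  induction cs with
  | nil => simp [skipQuote]
  | cons c rest ih =>
    simp only [skipQuote]
    split
    · simp
    · exact Nat.le_succ_of_le ih

-- Source B's parse: recursive-descent over the remaining suffix (Python's index i ↔ the suffix from i;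
-- the stop index ↔ the unconsumed suffix, Python's -1 failure ↔ none). The subtype carries the
-- length bound needed for termination (a totality guard, not an algorithm change).
def parseB : (cs : List Char) → Option { rem : List Char // rem.length ≤ cs.length }
  | [] => some ⟨[], Nat.le_refl _⟩
  | c :: rest =>
    if c = '\'' ∨ c = '"' then
      match parseB (skipQuote rest) with
      | none => none
      | some ⟨out, hout⟩ =>
          some ⟨out, by have h := skipQuote_length rest; simp only [List.length_cons]; omega⟩
    else if c = '(' ∨ c = '{' then
      match parseB rest with
      | none => none
      | some ⟨[], _⟩ => none
      | some ⟨r :: rem', hrem⟩ =>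
        if r = (if c = '(' then ')' else '}') then
          match parseB rem' with
          | none => none
          | some ⟨out, hout⟩ => some ⟨out, by simp only [List.length_cons] at hrem; simp only [List.length_cons]; omega⟩
        else none
    else if c = ')' ∨ c = '}' then some ⟨c :: rest, Nat.le_refl _⟩
    else
      match parseB rest with
      | none => none
      | some ⟨out, hout⟩ => some ⟨out, Nat.le_succ_of_le hout⟩
termination_by cs => cs.length
decreasing_by
  · have h := skipQuote_length rest; simp only [List.length_cons]; omega
  · simp only [List.length_cons]; omega
  · simp only [List.length_cons] at hrem; simp only [List.length_cons]; omega
  · simp only [List.length_cons]; omega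

def solution_alt (txt : String) : Int :=
  match parseB txt.toList with
  | some ⟨[], _⟩ => 1
  | _ => 0

-- ===== PRECONDITION & SPEC =====
def Spec_solution (txt : String) (out : Int) : Prop := out = solution_alt txt
instance (txt : String) (out : Int) : Decidable (Spec_solution txt out) := by unfold Spec_solution; infer_instance

-- ===== CLAIM (what is proved, stated in full; the proofs are below) =====
def Claim_equal_solution : Prop := ∀ (txt : String), Dom_solution txt → Spec_solution txt (solution txt)

-- ===== LEMMAS AND PROOFS =====

-- What A's loop does with a given stack once parseB's result for the remaining text is known.
def contin (stack : List Char) : Option (List Char) → Int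
  | none => 0
  | some [] => if stack.isEmpty then 1 else 0
  | some (r :: rem) =>
    match stack with
    | [] => 0
    | top :: s =>
      if (top = '(' ∧ r = ')') ∨ (top = '{' ∧ r = '}') then solutionLoop false s rem
      else 0

-- A's quote mode is exactly Source B's quote scan.
theorem loop_quote (cs : List Char) : ∀ (b : List Char),
    solutionLoop true b cs = solutionLoop false b (skipQuote cs) := by
  induction cs with
  | nil => intro b; rfl
  | cons c rest ih =>
    intro b
    by_cases hq : c = '\'' ∨ c = '"' <;>
      simp [solutionLoop, skipQuote, hq, ih]

theorem loop_eq_contin : ∀ (n : Nat) (cs : List Char), cs.length ≤ n → ∀ (stack : List Char),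
    solutionLoop false stack cs = contin stack ((parseB cs).map Subtype.val) := by
  intro n
  induction n with
  | zero =>
    intro cs hcs stack
    have : cs = [] := List.length_eq_zero_iff.mp (Nat.le_zero.mp hcs)
    subst this
    simp [solutionLoop, parseB, contin]
  | succ n ih =>
    intro cs hcs stack
    match cs with
    | [] => simp [solutionLoop, parseB, contin]
    | c :: rest =>
      have hrest : rest.length ≤ n := by simp at hcs; omega
      by_cases hq : c = '\'' ∨ c = '"'
      · have hskip : (skipQuote rest).length ≤ n :=
          le_trans (skipQuote_length rest) hrest
        have hL : solutionLoop false stack (c :: rest)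
            = contin stack ((parseB (skipQuote rest)).map Subtype.val) := by
          simp only [solutionLoop, hq, if_true, Bool.false_eq_true, if_false]
          rw [loop_quote, ih _ hskip]
        rw [hL]
        simp only [parseB, hq, if_true]
        cases hp : parseB (skipQuote rest) with
        | none => simp
        | some out => cases out with
          | mk v hv => simp
      · by_cases ho : c = '(' ∨ c = '{'
        · have hL : solutionLoop false stack (c :: rest)
              = contin (c :: stack) ((parseB rest).map Subtype.val) := by
            simp only [solutionLoop, hq, ho, if_false, if_true, Bool.false_eq_true]
            exact ih _ hrest _
          rw [hL]
          simp only [parseB, hq, ho, if_false, if_true]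
          cases hp : parseB rest with
          | none => simp [contin]
          | some out =>
            cases out with
            | mk v hv =>
              cases v with
              | nil => simp [contin]
              | cons r rem' =>
                have hrem' : rem'.length ≤ n := by
                  simp only [List.length_cons] at hv; omega
                by_cases hcl : r = (if c = '(' then ')' else '}')
                · have hm : (c = '(' ∧ r = ')') ∨ (c = '{' ∧ r = '}') := by
                    rcases ho with h1 | h1 <;> subst h1 <;> simp at hcl <;> simp [hcl]
                  have hLc : contin (c :: stack) (some (r :: rem'))
                      = solutionLoop false stack rem' := by
                    simp [contin, hm]
                  simp only [Option.map_some]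
                  rw [hLc, ih _ hrem' stack]
                  simp only [hcl, if_true]
                  cases hp2 : parseB rem' with
                  | none => simp
                  | some out2 => cases out2 with
                    | mk v2 hv2 => simp
                · have hm : ¬ ((c = '(' ∧ r = ')') ∨ (c = '{' ∧ r = '}')) := by
                    rcases ho with h1 | h1 <;> subst h1 <;> simp_all
                  simp [contin, hm, hcl]
        · by_cases hc : c = ')' ∨ c = '}'
          · simp only [solutionLoop, hq, ho, hc, if_false, if_true, Bool.false_eq_true]
            simp only [parseB, hq, ho, hc, if_false, if_true, Option.map_some, contin]
          · have hL : solutionLoop false stack (c :: rest)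
                = contin stack ((parseB rest).map Subtype.val) := by
              simp only [solutionLoop, hq, ho, hc, if_false, Bool.false_eq_true]
              exact ih _ hrest _
            rw [hL]
            simp only [parseB, hq, ho, hc, if_false]
            cases hp : parseB rest with
            | none => simp
            | some out => cases out with
              | mk v hv => simp

-- ===== VERDICT (by name: the statement is the Claim_ definition above) =====
theorem solution_spec : Claim_equal_solution := by
  intro txt _
  unfold Spec_solution solution solution_alt
  rw [loop_eq_contin txt.toList.length txt.toList (Nat.le_refl _) []]
  cases hp : parseB txt.toList with
  | none => simp [contin]
  | some out =>
    cases out with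
    | mk v hv =>
      cases v with
      | nil => simp [contin]
      | cons r rem => simp [contin]
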